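-- pv_equiv track=rewrite | github.com/kocijan-psen/Advent-of-code | 2019_Day6_part1_orbits.py | counterorbits
-- ===== SOURCE A (Python) =====
-- def counterorbits(dep_, orbits, tempcounter, on_orbit): #když není v kontrolním setu je to koncovka (breakpoint pro rekurzi)
--     to_find = dep_
--     turn_ = tempcounter
--     if to_find not in on_orbit:
--         return turn_
--
--     for j in range(len(orbits)):            #najdu hlednou planetu na orbitu a prohodím ji s tou na jejímž orbitu je, pak rekurze
--         if to_find == orbits[j][1]:
--             to_find = orbits[j][0]
--             turn_ +=1
--             if to_find not in on_orbit:
--                 return turn_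
--             return counterorbits(to_find, orbits, turn_, on_orbit)
-- ===== SOURCE B (Python) =====
-- def counterorbits(dep_, orbits, tempcounter, on_orbit):
--     on = set(on_orbit)
--     if dep_ not in on:
--         return tempcounter
--     parent = {}
--     for p, c in orbits:
--         parent.setdefault(c, p)          # first match in the list wins
--     node, count = dep_, tempcounter
--     while node in on:
--         if node not in parent:
--             return None
--         node = parent[node]
--         count += 1
--     return count
-- ===== Notes on version B (the rewrite author's own statement) =====
-- stated objective: alternative
-- what changed: B builds a first-match parent dictionary and a membership set once and walks up the chain with an iterative while loop, instead of rescanning the whole orbit list and re-testing list membership in every recursive call.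
-- outside the precondition, e.g. on counterorbits('a', [], 0, {'a'}): A returns None, B returns None
import Mathlib
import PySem

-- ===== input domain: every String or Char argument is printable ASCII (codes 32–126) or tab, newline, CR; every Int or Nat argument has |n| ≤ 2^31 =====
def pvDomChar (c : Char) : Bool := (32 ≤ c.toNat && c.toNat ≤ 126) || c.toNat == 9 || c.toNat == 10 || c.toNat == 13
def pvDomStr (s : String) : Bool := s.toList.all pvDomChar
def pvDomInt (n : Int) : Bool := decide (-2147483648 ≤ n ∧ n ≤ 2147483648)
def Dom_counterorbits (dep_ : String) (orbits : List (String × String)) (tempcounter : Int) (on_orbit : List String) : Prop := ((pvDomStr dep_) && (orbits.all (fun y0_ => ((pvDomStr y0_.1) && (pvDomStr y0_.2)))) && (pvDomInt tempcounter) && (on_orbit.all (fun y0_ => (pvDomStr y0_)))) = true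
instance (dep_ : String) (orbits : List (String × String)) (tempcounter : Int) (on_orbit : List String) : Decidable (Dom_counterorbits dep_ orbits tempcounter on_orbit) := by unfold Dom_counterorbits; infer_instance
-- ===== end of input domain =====

-- B replaces A's per-step rescan-and-recurse with a parent dictionary and a membership
-- set built once, then an iterative walk up the chain (objective: an alternative, index-free decomposition).

-- ===== PORT A =====
-- A's inner 'for j in range(len(orbits)): if to_find == orbits[j][1]': first pair whose
-- second component is to_find, scanned front to back.
def pvScanA (to_find : String) : List (String × String) → Option String
  | [] => none
  | p :: rest => if to_find = p.2 then some p.1 else pvScanA to_find rest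

-- A's recursion; fuel is only a termination device: on inputs where the Python A returns,
-- the chain makes at most orbits.length parent steps, so the fuel is never exhausted.
def pvRecA (orbits : List (String × String)) (on_orbit : List String) : Nat → String → Int → Int
  | fuel, to_find, turn_ =>
    if to_find ∈ on_orbit then
      match pvScanA to_find orbits with
      | some par =>
        if par ∈ on_orbit then
          match fuel with
          | 0 => 0            -- unreachable under Pre_
          | f + 1 => pvRecA orbits on_orbit f par (turn_ + 1)
        else turn_ + 1
      | none => 0             -- Python falls off the for loop and returns None; excluded by Pre_
    else turn_

def counterorbits (dep_ : String) (orbits : List (String × String)) (tempcounter : Int) (on_orbit : List String) : Int :=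
  pvRecA orbits on_orbit orbits.length dep_ tempcounter

-- ===== PORT B =====
-- parent = {}; for p, c in orbits: parent.setdefault(c, p)
def pvBuildParent (orbits : List (String × String)) : PySem.Dict String String :=
  orbits.foldl (fun d p => d.setdefault p.2 p.1) PySem.Dict.empty

-- the while loop: walk up via the dictionary; fuel as in A's port, never exhausted under Pre_.
def pvLoopB (parent : PySem.Dict String String) (on : PySem.Set String) : Nat → String → Int → Int
  | fuel, node, count =>
    if PySem.Set.contains on node then
      match parent.get? node with
      | none => 0             -- Python B returns None here; excluded by Pre_
      | some p =>
        match fuel with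
        | 0 => 0              -- unreachable under Pre_
        | f + 1 => pvLoopB parent on f p (count + 1)
    else count

def counterorbits_alt (dep_ : String) (orbits : List (String × String)) (tempcounter : Int) (on_orbit : List String) : Int :=
  if PySem.Set.contains (PySem.Set.ofList on_orbit) dep_ then
    pvLoopB (pvBuildParent orbits) (PySem.Set.ofList on_orbit) (orbits.length + 1) dep_ tempcounter
  else tempcounter

-- ===== PRECONDITION & SPEC =====
-- the first-match parent of x in orbits (the pair is (parent, child))
def pvParent? (orbits : List (String × String)) (x : String) : Option String :=
  (orbits.find? (fun p => p.2 == x)).map Prod.fst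

-- the node reached after k first-match parent steps from dep_, stepping only while inside
-- on_orbit; none once a step from an on_orbit node finds no parent
def pvChainNode (orbits : List (String × String)) (on_orbit : List String) (dep_ : String) : Nat → Option String
  | 0 => some dep_
  | k + 1 =>
    match pvChainNode orbits on_orbit dep_ k with
    | some x => if x ∈ on_orbit then pvParent? orbits x else some x
    | none => none

-- Pre_ holds exactly when A returns an int: the first-match parent chain from dep_ leaves
-- on_orbit within orbits.length steps. Outside Pre_, A either falls off its for loop and
-- returns None (no int) or recurses forever on a parent cycle (RecursionError).
def Pre_counterorbits (dep_ : String) (orbits : List (String × String)) (tempcounter : Int) (on_orbit : List String) : Prop :=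
  ((List.range (orbits.length + 1)).any fun k =>
    match pvChainNode orbits on_orbit dep_ k with
    | some x => !(decide (x ∈ on_orbit))
    | none => false) = true

instance (dep_ : String) (orbits : List (String × String)) (tempcounter : Int) (on_orbit : List String) : Decidable (Pre_counterorbits dep_ orbits tempcounter on_orbit) := by unfold Pre_counterorbits; infer_instance

def pvWitness_counterorbits : String × (List (String × String)) × Int × List String :=
  ("b", [("d", "c"), ("c", "b")], 0, ["b", "c"])

def Spec_counterorbits (dep_ : String) (orbits : List (String × String)) (tempcounter : Int) (on_orbit : List String) (out : Int) : Prop := out = counterorbits_alt dep_ orbits tempcounter on_orbit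
instance (dep_ : String) (orbits : List (String × String)) (tempcounter : Int) (on_orbit : List String) (out : Int) : Decidable (Spec_counterorbits dep_ orbits tempcounter on_orbit out) := by unfold Spec_counterorbits; infer_instance

-- ===== CLAIM (what is proved, stated in full; the proofs are below) =====
def Claim_equal_counterorbits : Prop := ∀ (dep_ : String) (orbits : List (String × String)) (tempcounter : Int) (on_orbit : List String), Dom_counterorbits dep_ orbits tempcounter on_orbit → Pre_counterorbits dep_ orbits tempcounter on_orbit → Spec_counterorbits dep_ orbits tempcounter on_orbit (counterorbits dep_ orbits tempcounter on_orbit)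

-- ===== LEMMAS AND PROOFS =====

-- first-match scan = lookup in the setdefault-built dictionary (generalized over the accumulator)
theorem pvScanA_eq_fold_get (orbits : List (String × String)) (d : PySem.Dict String String) (k : String) :
    (orbits.foldl (fun d p => d.setdefault p.2 p.1) d).get? k =
      match d.get? k with
      | some v => some v
      | none => pvScanA k orbits := by
  induction orbits generalizing d with
  | nil => cases h : d.get? k <;> simp [pvScanA, h]
  | cons p rest ih =>
    simp only [List.foldl_cons, ih, pvScanA]
    by_cases hk : k = p.2
    · rw [hk, PySem.Dict.get?_setdefault_self, if_pos rfl]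
      cases h : d.get? p.2 <;> simp [h]
    · rw [PySem.Dict.get?_setdefault_of_ne d p.1 hk, if_neg hk]

theorem pvBuildParent_get (orbits : List (String × String)) (k : String) :
    (pvBuildParent orbits).get? k = pvScanA k orbits := by
  rw [pvBuildParent, pvScanA_eq_fold_get]
  have h : (PySem.Dict.empty : PySem.Dict String String).get? k = none := rfl
  rw [h]

theorem contains_ofList (xs : List String) (x : String) :
    PySem.Set.contains (PySem.Set.ofList xs) x = decide (x ∈ xs) := by
  simp [PySem.Set.contains, PySem.Set.mem_ofList]

-- the two loops agree: A's recursion with fuel f equals B's walk with fuel f + 1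
theorem pvRec_eq_pvLoop (orbits : List (String × String)) (on_orbit : List String)
    (f : Nat) (node : String) (count : Int) :
    pvRecA orbits on_orbit f node count =
      pvLoopB (pvBuildParent orbits) (PySem.Set.ofList on_orbit) (f + 1) node count := by
  induction f generalizing node count with
  | zero =>
    rw [pvRecA, pvLoopB, contains_ofList]
    by_cases hn : node ∈ on_orbit
    · simp only [if_pos hn, decide_eq_true hn]
      rw [pvBuildParent_get]
      cases hs : pvScanA node orbits with
      | none => rfl
      | some p =>
        simp only []
        by_cases hp : p ∈ on_orbit
        · rw [if_pos hp, pvLoopB, contains_ofList, decide_eq_true hp]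
          simp only [pvBuildParent_get]
          cases pvScanA p orbits <;> rfl
        · rw [if_neg hp, pvLoopB, contains_ofList, decide_eq_false hp]
          simp
    · simp [if_neg hn, decide_eq_false hn]
  | succ g ih =>
    rw [pvRecA, pvLoopB, contains_ofList]
    by_cases hn : node ∈ on_orbit
    · simp only [if_pos hn, decide_eq_true hn]
      rw [pvBuildParent_get]
      cases hs : pvScanA node orbits with
      | none => rfl
      | some p =>
        simp only []
        by_cases hp : p ∈ on_orbit
        · rw [if_pos hp, ih, if_pos trivial]
        · rw [if_neg hp, pvLoopB, contains_ofList, decide_eq_false hp]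
          simp
    · simp [if_neg hn, decide_eq_false hn]

-- ===== VERDICT (by name: the statement is the Claim_ definition above) =====
theorem counterorbits_spec : Claim_equal_counterorbits := by
  intro dep_ orbits tempcounter on_orbit _ _
  unfold Spec_counterorbits counterorbits counterorbits_alt
  rw [pvRec_eq_pvLoop, contains_ofList]
  by_cases h : dep_ ∈ on_orbit
  · simp [decide_eq_true h]
  · simp only [decide_eq_false h, Bool.false_eq_true, if_false]
    rw [pvLoopB, contains_ofList, decide_eq_false h]
    simp
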